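-- pv_equiv track=rewrite | github.com/VelanieNurShabrina/isat-backend | isat_pdu_encoder.py | gsm7_pack
-- ===== SOURCE A (Python) =====
-- def gsm7_pack(text):
--     septets = [ord(c) & 0x7F for c in text]
--     bits = 0
--     bit_len = 0
--     out = []
--
--     for s in septets:
--         bits |= s << bit_len
--         bit_len += 7
--         while bit_len >= 8:
--             out.append(bits & 0xFF)
--             bits >>= 8
--             bit_len -= 8
--
--     if bit_len > 0:
--         out.append(bits & 0xFF)
--
--     return "".join(f"{b:02X}" for b in out)
-- ===== SOURCE B (Python) =====
-- def gsm7_pack(text):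
--     septets = [ord(c) & 0x7F for c in text]
--     n = len(septets)
--     out = []
--     for i, s in enumerate(septets):
--         shift = i % 8
--         if shift == 7:
--             continue  # this septet was fully absorbed into the previous byte
--         b = s >> shift
--         if i + 1 < n:
--             b |= (septets[i + 1] << (7 - shift)) & 0xFF
--         out.append(b)
--     return "".join(f"{b:02X}" for b in out)
-- ===== Notes on version B (the rewrite author's own statement) =====
-- stated objective: alternative
-- what changed: Replaces A's running bits/bit_len bit-accumulator (with an inner while-loop draining full bytes and a final flush) by a single index loop that emits exactly one byte per septet directly from septets[i] and septets[i+1] using the cyclic shift i % 8, skipping every 8th septet, which is fully absorbed into the previous byte.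
import Mathlib
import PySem

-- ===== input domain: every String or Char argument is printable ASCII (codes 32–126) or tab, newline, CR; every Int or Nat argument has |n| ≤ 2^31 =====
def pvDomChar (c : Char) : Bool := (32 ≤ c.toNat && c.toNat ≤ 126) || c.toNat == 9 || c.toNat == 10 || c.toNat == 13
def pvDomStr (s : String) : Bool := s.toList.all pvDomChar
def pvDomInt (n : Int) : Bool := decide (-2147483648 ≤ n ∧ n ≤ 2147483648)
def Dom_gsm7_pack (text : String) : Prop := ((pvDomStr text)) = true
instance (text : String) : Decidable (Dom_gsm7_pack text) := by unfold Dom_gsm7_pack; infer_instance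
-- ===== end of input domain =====

-- B replaces A's running bits/bit_len accumulator by an index loop emitting one byte per
-- septet (skipping every 8th) from the septet and its successor; same output ("alternative").

-- f"{b:02X}": two uppercase hex digits, zero-padded; exact for b < 256 (every byte either
-- program formats has been masked with 0xFF or is a right-shifted septet, hence < 256).
def pvHexDigit (n : Nat) : Char :=
  (['0','1','2','3','4','5','6','7','8','9','A','B','C','D','E','F']).getD n '0'

def pvHexByte (b : Nat) : String := String.ofList [pvHexDigit (b / 16), pvHexDigit (b % 16)]

-- ===== PORT A =====
-- the inner `while bit_len >= 8:` loop of A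
def pvDrain (bits bitLen : Nat) (out : List Nat) : Nat × Nat × List Nat :=
  if _h : 8 ≤ bitLen then pvDrain (bits >>> 8) (bitLen - 8) (out ++ [bits &&& 0xFF])
  else (bits, bitLen, out)
termination_by bitLen
decreasing_by omega

-- one iteration of A's `for s in septets:` loop over the state (bits, bit_len, out)
def pvStepA (st : Nat × Nat × List Nat) (s : Nat) : Nat × Nat × List Nat :=
  pvDrain (st.1 ||| (s <<< st.2.1)) (st.2.1 + 7) st.2.2

-- A's trailing `if bit_len > 0:` flush
def pvFinishA (st : Nat × Nat × List Nat) : List Nat :=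
  if 0 < st.2.1 then st.2.2 ++ [st.1 &&& 0xFF] else st.2.2

def gsm7_pack (text : String) : String :=
  String.join ((pvFinishA ((text.toList.map (fun c => c.toNat &&& 0x7F)).foldl pvStepA
    (0, 0, []))).map pvHexByte)

-- ===== PORT B =====
-- B's `for i, s in enumerate(septets):` loop; `septets[i+1]` is the head of `rest`
def pvPackB (i : Nat) (l : List Nat) : List Nat :=
  match l with
  | [] => []
  | s :: rest =>
    let shift := i % 8
    if shift = 7 then pvPackB (i + 1) rest
    else
      let b := s >>> shift
      let b := match rest with
        | [] => b
        | s2 :: _ => b ||| ((s2 <<< (7 - shift)) &&& 0xFF)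
      b :: pvPackB (i + 1) rest

def gsm7_pack_alt (text : String) : String :=
  String.join ((pvPackB 0 (text.toList.map (fun c => c.toNat &&& 0x7F))).map pvHexByte)

-- ===== PRECONDITION & SPEC =====
def Spec_gsm7_pack (text : String) (out : String) : Prop := out = gsm7_pack_alt text
instance (text : String) (out : String) : Decidable (Spec_gsm7_pack text out) := by unfold Spec_gsm7_pack; infer_instance

-- ===== CLAIM (what is proved, stated in full; the proofs are below) =====
def Claim_equal_gsm7_pack : Prop := ∀ (text : String), Dom_gsm7_pack text → Spec_gsm7_pack text (gsm7_pack text)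

-- ===== LEMMAS AND PROOFS =====

-- A's emissions, read off the loop: what A appends to `out` from state (bits, bl)
-- on the remaining septets, including the final flush.
def pvEmitA (bits bl : Nat) (l : List Nat) : List Nat :=
  match l with
  | [] => if 0 < bl then [bits &&& 0xFF] else []
  | s :: r =>
    if 8 ≤ bl + 7 then
      ((bits ||| (s <<< bl)) &&& 0xFF) :: pvEmitA ((bits ||| (s <<< bl)) >>> 8) (bl + 7 - 8) r
    else pvEmitA (bits ||| (s <<< bl)) (bl + 7) r

-- B's bytes from index t, preceded (when t % 8 ≠ 0) by the pending byte t-1 whose low part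
-- is `bits` and whose high part comes from the next septet.
def pvGlue (t bits : Nat) (l : List Nat) : List Nat :=
  if t % 8 = 0 then pvPackB t l
  else match l with
    | [] => [bits]
    | s :: _ => (bits ||| ((s <<< (7 * t % 8)) &&& 0xFF)) :: pvPackB t l

theorem pvDrain_lt (bits bl : Nat) (out : List Nat) (h : bl < 8) :
    pvDrain bits bl out = (bits, bl, out) := by
  unfold pvDrain; simp [Nat.not_le.mpr h]

theorem pvDrain_mid (bits bl : Nat) (out : List Nat) (h8 : 8 ≤ bl) (h16 : bl < 16) :
    pvDrain bits bl out = (bits >>> 8, bl - 8, out ++ [bits &&& 0xFF]) := by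
  rw [pvDrain, dif_pos h8, pvDrain_lt _ _ _ (by omega)]

theorem pvMask_eq (a : Nat) (h : a < 256) : a &&& 0xFF = a := by
  have h255 : (0xFF : Nat) = 2 ^ 8 - 1 := rfl
  rw [h255, Nat.and_two_pow_sub_one_eq_mod]; omega

theorem pvMask_or (a b : Nat) (h : a < 256) : (a ||| b) &&& 0xFF = a ||| (b &&& 0xFF) := by
  apply Nat.eq_of_testBit_eq; intro i
  have h255 : (0xFF : Nat) = 2 ^ 8 - 1 := rfl
  simp only [Nat.testBit_and, Nat.testBit_lor, h255, Nat.testBit_two_pow_sub_one]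
  by_cases hi : i < 8
  · simp [hi]
  · have h8 : a < 2 ^ 8 := lt_of_lt_of_le h (by norm_num)
    have ha : a.testBit i = false :=
      Nat.testBit_lt_two_pow (lt_of_lt_of_le h8 (Nat.pow_le_pow_right (by norm_num) (by omega)))
    simp [hi, ha]

theorem pvShift_out (bits s bl : Nat) (hb : bits < 2 ^ bl) (h7 : bl ≤ 7) :
    (bits ||| (s <<< bl)) >>> 8 = s >>> (8 - bl) := by
  apply Nat.eq_of_testBit_eq; intro i
  simp only [Nat.testBit_shiftRight, Nat.testBit_lor, Nat.testBit_shiftLeft]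
  have ha : bits.testBit (8 + i) = false :=
    Nat.testBit_lt_two_pow (lt_of_lt_of_le hb (Nat.pow_le_pow_right (by norm_num) (by omega)))
  have h1 : bl ≤ 8 + i := by omega
  have h2 : 8 + i - bl = 8 - bl + i := by omega
  simp [ha, h1, h2]

theorem pvShift_bound (s bl : Nat) (hs : s < 128) (h1 : 1 ≤ bl) (h7 : bl ≤ 7) :
    s >>> (8 - bl) < 2 ^ (bl + 7 - 8) := by
  rw [Nat.shiftRight_eq_div_pow, Nat.div_lt_iff_lt_mul (Nat.two_pow_pos _)]
  have he : 2 ^ (bl + 7 - 8) * 2 ^ (8 - bl) = 128 := by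
    rw [← pow_add]
    have h : bl + 7 - 8 + (8 - bl) = 7 := by omega
    rw [h]; norm_num
  omega

-- the accumulator loop of A, peeled: final `out` = initial `out` ++ emissions
theorem pvFoldA (l : List Nat) : ∀ (bits bl : Nat) (out : List Nat), bl < 8 →
    pvFinishA (l.foldl pvStepA (bits, bl, out)) = out ++ pvEmitA bits bl l := by
  induction l with
  | nil =>
    intro bits bl out _
    simp only [List.foldl_nil, pvEmitA, pvFinishA]
    split <;> simp
  | cons s r ih =>
    intro bits bl out hbl
    simp only [List.foldl_cons, pvStepA, pvEmitA]
    by_cases h : 8 ≤ bl + 7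
    · rw [pvDrain_mid _ _ _ h (by omega)]
      rw [ih _ _ _ (by omega)]
      simp [h]
    · rw [pvDrain_lt _ _ _ (by omega)]
      rw [ih _ _ _ (by omega)]
      simp [h]

-- gluing step: B's byte list from index t equals the pending-byte view from index t+1
theorem pvGlue_step (t s : Nat) (r : List Nat) :
    pvGlue (t + 1) (s >>> (t % 8)) r = pvPackB t (s :: r) := by
  by_cases h7 : t % 8 = 7
  · have h0 : (t + 1) % 8 = 0 := by omega
    simp [pvGlue, pvPackB, h0, h7]
  · have h0 : (t + 1) % 8 ≠ 0 := by omega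
    have hsh : 7 * (t + 1) % 8 = 7 - t % 8 := by omega
    cases r with
    | nil => simp [pvGlue, pvPackB, h0, h7]
    | cons s2 r2 => simp [pvGlue, pvPackB, h0, h7, hsh]

-- the main correspondence: A's emissions from position t equal B's bytes (with pending byte)
theorem pvEmitA_eq_glue (l : List Nat) : ∀ (t bits : Nat),
    (∀ s ∈ l, s < 128) → bits < 2 ^ (7 * t % 8) →
    pvEmitA bits (7 * t % 8) l = pvGlue t bits l := by
  induction l with
  | nil =>
    intro t bits _ hb
    by_cases h0 : t % 8 = 0
    · have hbl : 7 * t % 8 = 0 := by omega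
      simp [pvEmitA, pvGlue, pvPackB, h0, hbl]
    · have hbl : 0 < 7 * t % 8 := by omega
      have hble : 7 * t % 8 ≤ 7 := by omega
      have hb256 : bits < 256 :=
        lt_of_lt_of_le hb (le_trans (Nat.pow_le_pow_right (by norm_num) hble) (by norm_num))
      simp [pvEmitA, pvGlue, h0, hbl, pvMask_eq bits hb256]
  | cons s r ih =>
    intro t bits hall hb
    have hs : s < 128 := hall s List.mem_cons_self
    have hr : ∀ x ∈ r, x < 128 := fun x hx => hall x (List.mem_cons_of_mem _ hx)
    by_cases h0 : t % 8 = 0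
    · -- bl = 0: the septet is absorbed whole, no byte emitted yet
      have hbl : 7 * t % 8 = 0 := by omega
      have hb0 : bits = 0 := by rw [hbl] at hb; omega
      have hbl' : 7 * (t + 1) % 8 = 7 := by omega
      have step : pvEmitA bits (7 * t % 8) (s :: r) = pvEmitA s (7 * (t + 1) % 8) r := by
        simp [pvEmitA, hbl, hbl', hb0]
      rw [step, ih (t + 1) s hr (by rw [hbl']; exact hs.trans_le (by norm_num))]
      have hg := pvGlue_step t s r
      rw [h0, Nat.shiftRight_zero] at hg
      rw [hg]
      simp [pvGlue, h0]
    · -- bl ≥ 1: this septet completes one byte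
      have hbl1 : 1 ≤ 7 * t % 8 := by omega
      have hbl7 : 7 * t % 8 ≤ 7 := by omega
      have hb256 : bits < 256 :=
        lt_of_lt_of_le hb (le_trans (Nat.pow_le_pow_right (by norm_num) hbl7) (by norm_num))
      have hnext : 7 * t % 8 + 7 - 8 = 7 * (t + 1) % 8 := by omega
      have hshift : 8 - 7 * t % 8 = t % 8 := by omega
      have hbound : s >>> (t % 8) < 2 ^ (7 * (t + 1) % 8) := by
        rw [← hnext, ← hshift]
        exact pvShift_bound s (7 * t % 8) hs hbl1 hbl7
      have step : pvEmitA bits (7 * t % 8) (s :: r) =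
          (bits ||| ((s <<< (7 * t % 8)) &&& 0xFF)) ::
            pvEmitA (s >>> (t % 8)) (7 * (t + 1) % 8) r := by
        simp only [pvEmitA, if_pos (show 8 ≤ 7 * t % 8 + 7 by omega)]
        rw [pvMask_or _ _ hb256, pvShift_out bits s _ hb hbl7, hshift, hnext]
      rw [step, ih (t + 1) _ hr hbound, pvGlue_step t s r]
      simp [pvGlue, h0]

-- ===== VERDICT (by name: the statement is the Claim_ definition above) =====
theorem gsm7_pack_spec : Claim_equal_gsm7_pack := by
  intro text _
  unfold Spec_gsm7_pack gsm7_pack gsm7_pack_alt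
  have hall : ∀ s ∈ text.toList.map (fun c => c.toNat &&& 0x7F), s < 128 := by
    intro s hs
    rcases List.mem_map.mp hs with ⟨c, _, rfl⟩
    exact lt_of_le_of_lt Nat.and_le_right (by norm_num)
  rw [pvFoldA _ 0 0 [] (by norm_num), List.nil_append]
  have h2 := pvEmitA_eq_glue (text.toList.map (fun c => c.toNat &&& 0x7F)) 0 0 hall
    (by norm_num)
  norm_num at h2
  rw [h2]
  simp [pvGlue]
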